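-- pv_equiv track=rewrite | github.com/theElandor/Everybody-Codes | day2/c.py | find_h
-- ===== SOURCE A (Python) =====
-- def find_h(row, word_):
--     found = []
--     for word in [word_, word_[::-1]]:
--         for i in range(len(row)):
--             positions = []
--             for j in range(len(word)):
--                 pos = (i+j)%len(row)
--                 current = row[pos]
--                 if word[j] != current:
--                     positions.clear()
--                     break
--                 positions.append(pos)
--             else:
--                 found.append(positions)
--     return found
-- ===== SOURCE B (Python) =====
-- def find_h(row, word_):
--     n = len(row)
--     found = []
--     if n == 0:
--         return found
--     ext = row * (len(word_) // n + 2)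
--     for word in (word_, word_[::-1]):
--         m = len(word)
--         start = ext.find(word)
--         while start != -1 and start < n:
--             found.append([(start + j) % n for j in range(m)])
--             start = ext.find(word, start + 1)
--     return found
-- ===== Notes on version B (the rewrite author's own statement) =====
-- stated objective: faster
-- what changed: A tests every start position with a per-character Python loop using modular indexing; B extends the row just far enough to linearize the circular wrap and then jumps from match to match with C-implemented str.find, computing each position list by formula.
import Mathlib
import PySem

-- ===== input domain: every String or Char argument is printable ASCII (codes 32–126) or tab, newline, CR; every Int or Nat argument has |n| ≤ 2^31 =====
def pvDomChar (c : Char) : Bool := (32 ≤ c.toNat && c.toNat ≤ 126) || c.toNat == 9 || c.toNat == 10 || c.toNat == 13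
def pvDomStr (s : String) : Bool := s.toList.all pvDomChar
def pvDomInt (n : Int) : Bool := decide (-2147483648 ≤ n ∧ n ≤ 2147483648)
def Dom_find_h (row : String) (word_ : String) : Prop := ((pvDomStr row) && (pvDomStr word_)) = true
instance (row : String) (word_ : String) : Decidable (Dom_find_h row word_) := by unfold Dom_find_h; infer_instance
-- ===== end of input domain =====

-- B replaces A's per-start character loop with C-style substring search (str.find) on the row
-- extended far enough to cover the circular wrap, emitting matches in the order find reports them.

-- ===== PORT A =====
-- inner 'for j in range(len(word))' with break/else: returns none on break (positions cleared,
-- no append), some positions when the loop completes.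
def find_h_go (row word : List Char) (i : Int) : List Int → List Int → Option (List Int)
  | [], positions => some positions
  | j :: js, positions =>
    let pos := PySem.Int.mod (i + j) (PySem.List.len row)
    let current := PySem.List.pyGetD row pos ' '   -- row[pos]; pos = (i+j) % len(row) is in range
    if PySem.List.pyGetD word j ' ' ≠ current then none   -- word[j]; j from range(len(word))
    else find_h_go row word i js (positions ++ [pos])

def find_h (row : String) (word_ : String) : List (List Int) :=
  let r := row.toList
  -- word_[::-1] is reverse (PySem.Str.slice?_none_none_neg_one)
  [word_.toList, word_.toList.reverse].foldl (fun found word =>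
    (PySem.List.pyRange 0 (PySem.List.len r) 1).foldl (fun found i =>
      match find_h_go r word i (PySem.List.pyRange 0 (PySem.List.len word) 1) [] with
      | some positions => found ++ [positions]
      | none => found) found) []

-- ===== PORT B =====
-- the 'while start != -1 and start < n' loop; start strictly increases every iteration and the
-- loop body runs only for start < n, so n+1 steps of fuel always suffice (fuel only makes the
-- same computation total).
def find_h_alt_go (ext word : List Char) (n : Int) : Nat → Int → List (List Int) → List (List Int)
  | 0, _, found => found
  | fuel+1, start, found =>
    if start ≠ -1 ∧ start < n then
      find_h_alt_go ext word n fuel (PySem.Chars.findFrom ext word (start + 1))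
        (found ++ [(PySem.List.pyRange 0 (PySem.List.len word) 1).map
                     (fun j => PySem.Int.mod (start + j) n)])
    else found

def find_h_alt (row : String) (word_ : String) : List (List Int) :=
  let r := row.toList
  let n := PySem.List.len r
  if n = 0 then [] else
  let ext := PySem.List.pyRepeat r (PySem.Int.floordiv (PySem.List.len word_.toList) n + 2)
  [word_.toList, word_.toList.reverse].foldl (fun found word =>
    find_h_alt_go ext word n (r.length + 1) (PySem.Chars.find ext word) found) []

-- ===== PRECONDITION & SPEC =====
def Spec_find_h (row : String) (word_ : String) (out : List (List Int)) : Prop := out = find_h_alt row word_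
instance (row : String) (word_ : String) (out : List (List Int)) : Decidable (Spec_find_h row word_ out) := by unfold Spec_find_h; infer_instance

-- ===== CLAIM (what is proved, stated in full; the proofs are below) =====
def Claim_equal_find_h : Prop := ∀ (row : String) (word_ : String), Dom_find_h row word_ → Spec_find_h row word_ (find_h row word_)

-- ===== LEMMAS AND PROOFS =====

-- word matches circularly at start i, checked from word index t on (A's inner-loop condition)
abbrev okFrom (r w : List Char) (i : Int) (t : Nat) : Prop :=
  ∀ j : Nat, j < w.length → t ≤ j →
    PySem.List.pyGetD w (j : Int) ' ' = PySem.List.pyGetD r (PySem.Int.mod (i + (j : Int)) (r.length : Int)) ' '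

-- the position list both programs emit for a match at start i
abbrev posL (r w : List Char) (i : Int) : List Int :=
  (PySem.List.pyRange 0 (w.length : Int) 1).map (fun j => PySem.Int.mod (i + j) (r.length : Int))

-- reference result: matches with start in [s, r.length), in increasing order
def Mrec (r w : List Char) (s : Nat) : List (List Int) :=
  if _h : s < r.length then
    (if okFrom r w (s : Int) 0 then [posL r w (s : Int)] else []) ++ Mrec r w (s + 1)
  else []
termination_by r.length - s

lemma pyRange_one_nil {a b : Int} (h : b ≤ a) : PySem.List.pyRange a b 1 = [] := by
  simp [PySem.List.pyRange, h]

lemma goA (r w : List Char) (i : Int) (t : Nat) (acc : List Int) :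
    find_h_go r w i (PySem.List.pyRange (t : Int) (w.length : Int) 1) acc =
      if okFrom r w i t then
        some (acc ++ (PySem.List.pyRange (t : Int) (w.length : Int) 1).map
          (fun j => PySem.Int.mod (i + j) (r.length : Int)))
      else none := by
  have H : ∀ (d t : Nat) (acc : List Int), w.length - t ≤ d →
      find_h_go r w i (PySem.List.pyRange (t : Int) (w.length : Int) 1) acc =
        if okFrom r w i t then
          some (acc ++ (PySem.List.pyRange (t : Int) (w.length : Int) 1).map
            (fun j => PySem.Int.mod (i + j) (r.length : Int)))
        else none := by
    intro d
    induction d with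
    | zero =>
      intro t acc hle
      rw [pyRange_one_nil (by exact_mod_cast (by omega : w.length ≤ t))]
      rw [if_pos (by intro j hj htj; omega)]
      simp [find_h_go]
    | succ d ih =>
      intro t acc hle
      by_cases hm : t < w.length
      · rw [PySem.List.pyRange_one_cons (by exact_mod_cast hm)]
        show (if PySem.List.pyGetD w (t : Int) ' ' ≠
                  PySem.List.pyGetD r (PySem.Int.mod (i + (t : Int)) (PySem.List.len r)) ' ' then none
              else find_h_go r w i (PySem.List.pyRange ((t : Int) + 1) (w.length : Int) 1)
                (acc ++ [PySem.Int.mod (i + (t : Int)) (PySem.List.len r)])) = _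
        simp only [PySem.List.len_eq]
        by_cases heq : PySem.List.pyGetD w (t : Int) ' ' =
            PySem.List.pyGetD r (PySem.Int.mod (i + (t : Int)) (r.length : Int)) ' '
        · have hiff : okFrom r w i t ↔ okFrom r w i (t + 1) := by
            constructor
            · intro h j hj htj; exact h j hj (by omega)
            · intro h j hj htj
              rcases Nat.eq_or_lt_of_le htj with rfl | hlt
              · exact heq
              · exact h j hj hlt
          have hcast : (t : Int) + 1 = ((t + 1 : Nat) : Int) := by push_cast; ring
          rw [if_neg (fun h => h heq), hcast, ih (t + 1) _ (by omega)]
          by_cases hok : okFrom r w i (t + 1)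
          · rw [if_pos hok, if_pos (hiff.mpr hok)]
            simp only [List.map_cons, List.append_assoc, List.singleton_append]
          · rw [if_neg hok, if_neg (fun h => hok (hiff.mp h))]
        · rw [if_pos heq]
          rw [if_neg (by intro h; exact heq (h t hm le_rfl))]
      · rw [pyRange_one_nil (by exact_mod_cast (by omega : w.length ≤ t))]
        rw [if_pos (by intro j hj htj; omega)]
        simp [find_h_go]
  exact H (w.length - t) t acc le_rfl

lemma Mrec_nil (r w : List Char) (s : Nat) (h : r.length ≤ s) : Mrec r w s = [] := by
  unfold Mrec; simp [Nat.not_lt.mpr h]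

lemma Mrec_skip (r w : List Char) (s p : Nat) (hsp : s ≤ p) (hp : p ≤ r.length)
    (hno : ∀ i : Nat, s ≤ i → i < p → ¬ okFrom r w (i : Int) 0) : Mrec r w s = Mrec r w p := by
  have H : ∀ (d s : Nat), s ≤ p → p ≤ r.length → (∀ i : Nat, s ≤ i → i < p → ¬ okFrom r w (i : Int) 0) →
      p - s ≤ d → Mrec r w s = Mrec r w p := by
    intro d
    induction d with
    | zero => intro s h1 _ _ h4; have : s = p := by omega
              rw [this]
    | succ d ih =>
      intro s h1 h2 h3 h4
      rcases Nat.eq_or_lt_of_le h1 with rfl | hlt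
      · rfl
      · rw [Mrec, dif_pos (by omega), if_neg (h3 s le_rfl hlt)]
        simpa using ih (s + 1) (by omega) h2 (fun i hi hip => h3 i (by omega) hip) (by omega)
  exact H (p - s) s hsp hp hno le_rfl

lemma outerA (r w : List Char) (t : Nat) (found : List (List Int)) :
    (PySem.List.pyRange (t : Int) (r.length : Int) 1).foldl (fun found i =>
      match find_h_go r w i (PySem.List.pyRange 0 (w.length : Int) 1) [] with
      | some positions => found ++ [positions]
      | none => found) found = found ++ Mrec r w t := by
  have H : ∀ (d t : Nat) (found : List (List Int)), r.length - t ≤ d →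
      (PySem.List.pyRange (t : Int) (r.length : Int) 1).foldl (fun found i =>
        match find_h_go r w i (PySem.List.pyRange 0 (w.length : Int) 1) [] with
        | some positions => found ++ [positions]
        | none => found) found = found ++ Mrec r w t := by
    intro d
    induction d with
    | zero =>
      intro t found hle
      rw [pyRange_one_nil (a := (t : Int)) (b := (r.length : Int))
            (by exact_mod_cast (by omega : r.length ≤ t)), Mrec_nil r w t (by omega)]
      simp
    | succ d ih =>
      intro t found hle
      by_cases hm : t < r.length
      · rw [PySem.List.pyRange_one_cons (a := (t : Int)) (b := (r.length : Int))
              (by exact_mod_cast hm)]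
        rw [List.foldl_cons]
        have hgo := goA r w (t : Int) 0 []
        simp only [Nat.cast_zero] at hgo
        rw [hgo]
        have hcast : (t : Int) + 1 = ((t + 1 : Nat) : Int) := by push_cast; ring
        rw [hcast]
        rw [Mrec, dif_pos hm]
        by_cases hok : okFrom r w (t : Int) 0
        · rw [if_pos hok]
          show (PySem.List.pyRange _ _ 1).foldl _ (found ++ [posL r w (t : Int)]) = _
          rw [ih (t + 1) _ (by omega), if_pos hok]
          simp
        · rw [if_neg hok]
          show (PySem.List.pyRange _ _ 1).foldl _ found = _
          rw [ih (t + 1) _ (by omega), if_neg hok]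
          simp
      · rw [pyRange_one_nil (a := (t : Int)) (b := (r.length : Int))
              (by exact_mod_cast (by omega : r.length ≤ t)), Mrec_nil r w t (by omega)]
        simp
  exact H (r.length - t) t found le_rfl

-- extension length and periodicity
lemma ext_len (r : List Char) (R : Nat) : ((List.replicate R r).flatten).length = R * r.length := by
  simp

lemma ext_periodic (r : List Char) (R : Nat) (t : Nat) (ht : t < R * r.length) :
    ((List.replicate R r).flatten)[t]? = r[t % r.length]? := by
  induction R generalizing t with
  | zero => omega
  | succ R ih =>
    have hmul : (R + 1) * r.length = R * r.length + r.length := by ring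
    have hflat : (List.replicate (R + 1) r).flatten = r ++ (List.replicate R r).flatten := by
      simp [List.replicate_succ]
    rw [hflat]
    by_cases hlt : t < r.length
    · rw [List.getElem?_append_left hlt, Nat.mod_eq_of_lt hlt]
    · have hn : 0 < r.length := Nat.pos_of_ne_zero (by
        rintro h0
        rw [h0, Nat.mul_zero] at ht
        omega)
      rw [List.getElem?_append_right (by omega)]
      rw [ih (t - r.length) (by omega)]
      conv_rhs => rw [Nat.mod_eq_sub_mod (by omega : r.length ≤ t)]

-- the bridge: A's circular condition at start i < n ↔ w is a prefix of ext.drop i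
lemma bridge (r w : List Char) (R : Nat) (hn : 0 < r.length)
    (hR : r.length + w.length ≤ R * r.length) (i : Nat) (hi : i < r.length) :
    okFrom r w (i : Int) 0 ↔ w <+: ((List.replicate R r).flatten).drop i := by
  rw [List.prefix_iff_getElem?]
  have key : ∀ j : Nat, j < w.length →
      ((PySem.List.pyGetD w (j : Int) ' ' =
        PySem.List.pyGetD r (PySem.Int.mod ((i : Int) + (j : Int)) (r.length : Int)) ' ') ↔
       (((List.replicate R r).flatten).drop i)[j]? = w[j]?) := by
    intro j hj
    have h1 : ((i : Int) + (j : Int)) = (((i + j : Nat)) : Int) := by push_cast; ring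
    rw [h1, PySem.Int.mod_natCast, PySem.List.pyGetD_natCast, PySem.List.pyGetD_natCast]
    rw [List.getElem?_drop, ext_periodic r R (i + j) (by omega)]
    have hjm : (i + j) % r.length < r.length := Nat.mod_lt _ hn
    rw [List.getD_eq_getElem?_getD, List.getD_eq_getElem?_getD,
        List.getElem?_eq_getElem hj, List.getElem?_eq_getElem hjm]
    simp [eq_comm]
  constructor
  · intro hok j hj
    exact (key j hj).mp (hok j hj (by omega)) |>.trans (List.getElem?_eq_getElem hj)
  · intro hpre j hj _
    exact (key j hj).mpr ((hpre j hj).trans (List.getElem?_eq_getElem hj).symm)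

lemma chain (r w : List Char) (R : Nat) (hn : 0 < r.length)
    (hR : r.length + w.length ≤ R * r.length) :
    ∀ (fuel s : Nat) (found : List (List Int)), s ≤ r.length → r.length + 1 ≤ fuel + s →
    find_h_alt_go ((List.replicate R r).flatten) w ((r.length : Int)) fuel
        (PySem.Chars.findFrom ((List.replicate R r).flatten) w (s : Int)) found
      = found ++ Mrec r w s := by
  have hR1 : 1 ≤ R := by
    rcases Nat.eq_zero_or_pos R with h0 | h
    · rw [h0, Nat.zero_mul] at hR; omega
    · exact h
  have hnR : r.length ≤ R * r.length := by
    calc r.length = 1 * r.length := (one_mul _).symm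
    _ ≤ R * r.length := Nat.mul_le_mul_right _ hR1
  have hextlen : ((List.replicate R r).flatten).length = R * r.length := ext_len r R
  intro fuel
  induction fuel with
  | zero =>
    intro s found h1 h2
    exact absurd h2 (by omega)
  | succ fuel ih =>
    intro s found hs hf
    have hsx : s ≤ ((List.replicate R r).flatten).length := by omega
    have hunf : ∀ (q : Int) (fd : List (List Int)),
        find_h_alt_go ((List.replicate R r).flatten) w ((r.length : Int)) (fuel + 1) q fd =
          (if q ≠ -1 ∧ q < (r.length : Int) then
            find_h_alt_go ((List.replicate R r).flatten) w ((r.length : Int)) fuel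
              (PySem.Chars.findFrom ((List.replicate R r).flatten) w (q + 1))
              (fd ++ [(PySem.List.pyRange 0 (PySem.List.len w) 1).map
                        (fun j => PySem.Int.mod (q + j) ((r.length : Int)))])
          else fd) := fun q fd => rfl
    by_cases hq : PySem.Chars.findFrom ((List.replicate R r).flatten) w (s : Int) = -1
    · -- no occurrence at all from s on: no circular match in [s, n) either
      have hno : ¬ w <:+: ((List.replicate R r).flatten).drop s :=
        (PySem.Chars.findFrom_natCast_eq_neg_one_iff _ w s hsx).mp hq
      have hnone : ∀ i : Nat, s ≤ i → i < r.length → ¬ okFrom r w (i : Int) 0 := by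
        intro i hsi hin hok
        apply hno
        rw [List.infix_iff_prefix_suffix]
        refine ⟨((List.replicate R r).flatten).drop i, (bridge r w R hn hR i hin).mp hok, ?_⟩
        have hdd := List.drop_suffix (i - s) (((List.replicate R r).flatten).drop s)
        rwa [List.drop_drop, Nat.add_sub_cancel' hsi] at hdd
      rw [Mrec_skip r w s r.length hs le_rfl hnone, Mrec_nil r w r.length le_rfl]
      rw [hunf, if_neg (by simp [hq])]
      simp
    · obtain ⟨hsq, hpre, hmin⟩ := PySem.Chars.findFrom_natCast_spec _ w s hsx hq
      have hq0 : (0 : Int) ≤ PySem.Chars.findFrom ((List.replicate R r).flatten) w (s : Int) :=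
        le_trans (by exact_mod_cast Nat.zero_le s) hsq
      have hqp : PySem.Chars.findFrom ((List.replicate R r).flatten) w (s : Int) =
          (((PySem.Chars.findFrom ((List.replicate R r).flatten) w (s : Int)).toNat : Nat) : Int) :=
        (Int.toNat_of_nonneg hq0).symm
      set p := (PySem.Chars.findFrom ((List.replicate R r).flatten) w (s : Int)).toNat with hpdef
      have hsp : s ≤ p := by
        rw [hqp] at hsq; exact_mod_cast hsq
      have hnomid : ∀ i : Nat, s ≤ i → i < p → i < r.length → ¬ okFrom r w (i : Int) 0 := by
        intro i hsi hip hin hok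
        exact hmin i hsi hip ((bridge r w R hn hR i hin).mp hok)
      by_cases hpn : p < r.length
      · -- next match is at p < n: emit it and continue after p
        have hokp : okFrom r w (p : Int) 0 := (bridge r w R hn hR p hpn).mpr hpre
        have hstep : Mrec r w s = posL r w (p : Int) :: Mrec r w (p + 1) := by
          rw [Mrec_skip r w s p hsp (by omega) (fun i h1 h2 => hnomid i h1 h2 (by omega)),
              Mrec, dif_pos hpn, if_pos hokp]
          simp
        have hcond : PySem.Chars.findFrom ((List.replicate R r).flatten) w (s : Int) ≠ -1 ∧
            PySem.Chars.findFrom ((List.replicate R r).flatten) w (s : Int) < (r.length : Int) := by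
          refine ⟨hq, ?_⟩
          rw [hqp]; exact_mod_cast hpn
        rw [hunf, if_pos hcond]
        rw [hqp]
        have hcast : ((p : Nat) : Int) + 1 = ((p + 1 : Nat) : Int) := by push_cast; ring
        rw [hcast, ih (p + 1) _ (by omega) (by omega)]
        rw [hstep]
        simp [PySem.List.len_eq]
      · -- next occurrence is at p ≥ n: nothing left in [s, n)
        have hnone : ∀ i : Nat, s ≤ i → i < r.length → ¬ okFrom r w (i : Int) 0 := by
          intro i hsi hin
          exact hnomid i hsi (by omega) hin
        rw [Mrec_skip r w s r.length hs le_rfl hnone, Mrec_nil r w r.length le_rfl]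
        rw [hunf, if_neg (by
          rintro ⟨-, hlt⟩
          rw [hqp] at hlt
          exact absurd (by exact_mod_cast hlt : p < r.length) hpn)]
        simp

-- ===== VERDICT (by name: the statement is the Claim_ definition above) =====
theorem find_h_spec : Claim_equal_find_h := by
  intro row word_ _
  show find_h row word_ = find_h_alt row word_
  by_cases hn0 : row.toList.length = 0
  · simp [find_h, find_h_alt, PySem.List.len_eq, hn0,
      pyRange_one_nil (a := (0 : Int)) (b := (0 : Int)) le_rfl]
  · have hn : 0 < row.toList.length := Nat.pos_of_ne_zero hn0
    set r := row.toList with hr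
    set w0 := word_.toList with hw0
    set R := w0.length / r.length + 2 with hRdef
    have htn : (((w0.length / r.length : Nat) : Int) + 2).toNat = R := by
      rw [show (((w0.length / r.length : Nat) : Int) + 2)
            = ((w0.length / r.length + 2 : Nat) : Int) from by push_cast; ring,
          Int.toNat_natCast]
    have hext : PySem.List.pyRepeat r (PySem.Int.floordiv (w0.length : Int) (r.length : Int) + 2)
        = (List.replicate R r).flatten := by
      rw [PySem.Int.floordiv_natCast]
      show (List.replicate ((((w0.length / r.length : Nat) : Int) + 2).toNat) r).flatten = _
      rw [htn]
    have hRlen : r.length + w0.length ≤ R * r.length := by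
      have h1 := Nat.div_add_mod w0.length r.length
      have h2 : w0.length % r.length < r.length := Nat.mod_lt _ hn
      have h3 : R * r.length = (w0.length / r.length) * r.length + 2 * r.length := by
        rw [hRdef]; ring
      have h4 : (w0.length / r.length) * r.length = r.length * (w0.length / r.length) :=
        Nat.mul_comm _ _
      omega
    have hRrev : r.length + w0.reverse.length ≤ R * r.length := by
      rw [List.length_reverse]; exact hRlen
    have houter := fun (w : List Char) (found : List (List Int)) => outerA r w 0 found
    simp only [Nat.cast_zero] at houter
    have hchain := fun (w : List Char) (hRw : r.length + w.length ≤ R * r.length)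
        (found : List (List Int)) =>
      chain r w R hn hRw (r.length + 1) 0 found (by omega) (by omega)
    simp only [Nat.cast_zero, PySem.Chars.findFrom_zero] at hchain
    simp only [find_h, find_h_alt, PySem.List.len_eq, List.foldl_cons, List.foldl_nil]
    rw [if_neg (by exact_mod_cast hn0 ∘ (by exact_mod_cast ·)), hext]
    rw [houter w0 [], houter w0.reverse _, hchain w0 hRlen [], hchain w0.reverse hRrev _]
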